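-- pv_equiv track=rewrite | github.com/lmao-lol-123/bailing-agent | backend/src/ingest/cleaning.py | _remove_first_matching_line
-- ===== SOURCE A (Python) =====
-- def _remove_first_matching_line(lines: list[str], target: str) -> list[str]:
--     removed = False
--     remaining: list[str] = []
--     for line in lines:
--         if not removed and line.strip() == target:
--             removed = True
--             continue
--         remaining.append(line)
--     return remaining
-- ===== SOURCE B (Python) =====
-- def _remove_first_matching_line(lines: list[str], target: str) -> list[str]:
--     for i, line in enumerate(lines):
--         if line.strip() == target:
--             return lines[:i] + lines[i + 1:]
--     return list(lines)
-- ===== Notes on version B (the rewrite author's own statement) =====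
-- stated objective: alternative
-- what changed: B separates locating the first matching line (an enumerate scan returning an index) from building the output (slice concatenation lines[:i]+lines[i+1:]), replacing A's single-pass flag-guarded accumulator.
import Mathlib
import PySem

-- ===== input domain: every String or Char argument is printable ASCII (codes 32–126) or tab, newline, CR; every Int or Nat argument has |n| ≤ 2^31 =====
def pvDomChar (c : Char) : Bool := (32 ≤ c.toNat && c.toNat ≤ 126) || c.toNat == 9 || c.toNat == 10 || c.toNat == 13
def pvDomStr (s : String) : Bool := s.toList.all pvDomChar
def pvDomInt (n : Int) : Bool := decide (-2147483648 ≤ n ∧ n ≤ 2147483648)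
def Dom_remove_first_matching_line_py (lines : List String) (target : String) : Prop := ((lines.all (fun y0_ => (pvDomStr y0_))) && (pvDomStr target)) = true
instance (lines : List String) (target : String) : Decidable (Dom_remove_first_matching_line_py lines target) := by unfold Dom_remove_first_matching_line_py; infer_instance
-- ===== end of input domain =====

-- B separates locating the first matching line (index scan) from building the output
-- (slice concatenation), instead of A's flag-guarded accumulating pass. Alternative decomposition; same cost.

-- ===== PORT A =====
-- A: one pass with a `removed` flag and an accumulator list.
def remove_first_matching_line_py (lines : List String) (target : String) : List String :=
  (lines.foldl
    (fun (st : Bool × List String) line =>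
      if !st.1 && (PySem.Str.strip line == target) then (true, st.2)
      else (st.1, st.2 ++ [line]))
    (false, [])).2

-- ===== PORT B =====
-- B helper: index of the first line whose strip equals target (the enumerate scan, as structural recursion).
def pvAltFindIdx (target : String) : List String → Option Nat
  | [] => none
  | l :: ls =>
    if PySem.Str.strip l == target then some 0
    else (pvAltFindIdx target ls).map (· + 1)

def remove_first_matching_line_py_alt (lines : List String) (target : String) : List String :=
  match pvAltFindIdx target lines with
  | some i => lines.take i ++ lines.drop (i + 1)   -- lines[:i] + lines[i+1:]
  | none => lines                                   -- list(lines): fresh copy, same value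

-- ===== PRECONDITION & SPEC =====
def Spec_remove_first_matching_line_py (lines : List String) (target : String) (out : List String) : Prop := out = remove_first_matching_line_py_alt lines target
instance (lines : List String) (target : String) (out : List String) : Decidable (Spec_remove_first_matching_line_py lines target out) := by unfold Spec_remove_first_matching_line_py; infer_instance

-- ===== CLAIM (what is proved, stated in full; the proofs are below) =====
def Claim_equal_remove_first_matching_line_py : Prop := ∀ (lines : List String) (target : String), Dom_remove_first_matching_line_py lines target → Spec_remove_first_matching_line_py lines target (remove_first_matching_line_py lines target)

-- ===== LEMMAS AND PROOFS =====

-- Once the flag is true, A's loop just appends the rest of the lines.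
theorem pvFoldlTrue (target : String) (lines : List String) (acc : List String) :
    (lines.foldl
      (fun (st : Bool × List String) line =>
        if !st.1 && (PySem.Str.strip line == target) then (true, st.2)
        else (st.1, st.2 ++ [line]))
      (true, acc)).2 = acc ++ lines := by
  induction lines generalizing acc with
  | nil => simp
  | cons l ls ih =>
    simp only [List.foldl, Bool.not_true, Bool.false_and, Bool.false_eq_true, if_false]
    rw [ih]; simp

-- B on a non-matching head is head :: B on the tail.
theorem pvAltCons (target : String) (l : String) (ls : List String)
    (h : (PySem.Str.strip l == target) = false) :
    remove_first_matching_line_py_alt (l :: ls) target =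
      l :: remove_first_matching_line_py_alt ls target := by
  unfold remove_first_matching_line_py_alt
  rw [pvAltFindIdx, h]
  cases hf : pvAltFindIdx target ls with
  | none => simp
  | some j => simp [List.take_succ_cons, List.drop_succ_cons]

-- Main invariant: A's loop from a false flag with accumulator acc yields acc ++ B's result.
theorem pvFoldlFalse (target : String) (lines : List String) (acc : List String) :
    (lines.foldl
      (fun (st : Bool × List String) line =>
        if !st.1 && (PySem.Str.strip line == target) then (true, st.2)
        else (st.1, st.2 ++ [line]))
      (false, acc)).2 = acc ++ remove_first_matching_line_py_alt lines target := by
  induction lines generalizing acc with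
  | nil => simp [remove_first_matching_line_py_alt, pvAltFindIdx]
  | cons l ls ih =>
    by_cases h : (PySem.Str.strip l == target) = true
    · simp only [List.foldl, h, Bool.not_false, Bool.true_and, if_pos]
      rw [pvFoldlTrue]
      simp [remove_first_matching_line_py_alt, pvAltFindIdx, h]
    · have h' : (PySem.Str.strip l == target) = false := by
        simpa using h
      simp only [List.foldl, h', Bool.not_false, Bool.true_and, Bool.false_eq_true, if_neg,
        not_false_eq_true]
      rw [ih, pvAltCons target l ls h']
      simp

-- ===== VERDICT (by name: the statement is the Claim_ definition above) =====
theorem remove_first_matching_line_py_spec : Claim_equal_remove_first_matching_line_py := by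
  intro lines target _
  unfold Spec_remove_first_matching_line_py remove_first_matching_line_py
  simpa using pvFoldlFalse target lines []
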